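-- pv_equiv track=rewrite | github.com/Anfany/Codility-Lessons-By-Python3 | L17_Dynamic programming/17.2_MinAbsSum.py | solution_normal
-- ===== SOURCE A (Python) =====
-- def solution_normal(A):
--     """
--     针对数组A，寻找一个由1和-1组成的数组，使得两个数组对应元素乘积和的绝对值最小
--     时间复杂度：:O(N**2 * max(abs(A)))
--     :param A: 数组A
--     :return: 返回最小的绝对值
--     """
--     if len(A) == 0:
--         return 0
--     elif len(A) == 1:
--         return abs(A[0])
--
--     A = [abs(i) for i in A]  # 将数组A的元素转为非负数
--     sum_num = sum(A)
--
--     sign = [0] * (sum_num // 2 + 1)  # 存储否可以达到数值的标识，不大于S/2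
--
--     for j in A:
--         if j <= sum_num // 2:  # 只有小于等于S/2的才计算
--             sign_copy = sign.copy()  # 防止同一个数重复加
--             for h in range(len(sign)):
--                 if sign[h] == 1:
--                     try:
--                         sign_copy[h + j] = 1
--                     except IndexError:
--                         pass
--             sign_copy[j] = 1
--             sign = sign_copy.copy()
--
--     for k in range(sum_num // 2, -1, -1):  # 从大到小开始，只要能达到，就返回
--         if sign[k] == 1:
--             return sum_num - 2 * k
-- ===== SOURCE B (Python) =====
-- def solution_normal(A):
--     sums = {0}
--     for x in A:
--         sums = {s + x for s in sums} | {s - x for s in sums}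
--     return min(abs(s) for s in sums)
-- ===== Notes on version B (the rewrite author's own statement) =====
-- stated objective: alternative
-- what changed: Instead of A's half-sum subset DP (abs preprocessing, boolean reachability array copied per element, backward scan, answer total-2*max), B enumerates the set of all achievable signed sums directly with a +/- branching fold and returns the minimum absolute value, with no abs pass, no halving and no special cases.
import Mathlib
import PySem

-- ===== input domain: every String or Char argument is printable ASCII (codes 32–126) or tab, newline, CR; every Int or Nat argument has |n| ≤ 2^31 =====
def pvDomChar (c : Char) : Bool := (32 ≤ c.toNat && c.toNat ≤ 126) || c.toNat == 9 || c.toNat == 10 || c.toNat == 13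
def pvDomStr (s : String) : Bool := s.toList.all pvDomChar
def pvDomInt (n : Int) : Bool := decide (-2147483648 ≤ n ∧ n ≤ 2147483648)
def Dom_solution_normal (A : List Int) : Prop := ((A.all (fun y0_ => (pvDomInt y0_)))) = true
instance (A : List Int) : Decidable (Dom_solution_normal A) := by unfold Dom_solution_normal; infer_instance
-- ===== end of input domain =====

-- B replaces A's half-sum subset-sum DP (abs pass, boolean array, backward scan, total - 2*max) by a
-- direct enumeration of all achievable signed sums (± branching fold) and min of absolute values: alternative.

-- ===== PORT A =====
-- loop body of A's outer 'for j in A', named for readability (a literal transliteration):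
-- inner loop writes into the copy while reading the old sign; IndexError is swallowed.
def pvStepA (half : Int) (sign : List Int) (j : Int) : List Int :=
  if j ≤ half then
    let signCopy := (PySem.List.pyRange 0 (PySem.List.len sign) 1).foldl (fun (c : List Int) h =>
      if PySem.List.pyGetD sign h 0 = 1 then
        match PySem.List.pySet? c (h + j) 1 with   -- sign_copy[h+j] = 1; except IndexError: pass
        | some c' => c'
        | none => c
      else c) sign
    PySem.List.pySetD signCopy j 1   -- sign_copy[j] = 1 (0 ≤ j ≤ S//2 < len(sign): always in range)
  else sign

def solution_normal (A : List Int) : Int :=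
  if A.length = 0 then 0
  else if A.length = 1 then |PySem.List.pyGetD A 0 0|
  else
    let A2 := A.map (fun i => |i|)
    let sum_num := A2.sum
    let sign : List Int := List.replicate (PySem.Int.floordiv sum_num 2 + 1).toNat 0
    let sign := A2.foldl (pvStepA (PySem.Int.floordiv sum_num 2)) sign
    match (PySem.List.pyRange (PySem.Int.floordiv sum_num 2) (-1) (-1)).find?
            (fun k => PySem.List.pyGetD sign k 0 == 1) with
    | some k => sum_num - 2 * k
    | none => 0   -- Python would return None here; unreachable for len(A) ≥ 2 (proved below)

-- ===== PORT B =====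
-- loop body of B's 'for x in A': sums = {s + x for s in sums} | {s - x for s in sums}
def pvStepB (s : PySem.Set Int) (x : Int) : PySem.Set Int :=
  PySem.Set.union (PySem.Set.ofList (s.map (fun r => r + x))) (PySem.Set.ofList (s.map (fun r => r - x)))

def solution_normal_alt (A : List Int) : Int :=
  let sums : PySem.Set Int := A.foldl pvStepB (PySem.Set.ofList [0])
  match PySem.List.min? (sums.map (fun s => |s|)) (fun y => y) with
  | some m => m
  | none => 0   -- Python min would raise on an empty set; unreachable since sums is never empty

-- ===== PRECONDITION & SPEC =====
def Spec_solution_normal (A : List Int) (out : Int) : Prop := out = solution_normal_alt A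
instance (A : List Int) (out : Int) : Decidable (Spec_solution_normal A out) := by unfold Spec_solution_normal; infer_instance

-- ===== CLAIM (what is proved, stated in full; the proofs are below) =====
def Claim_equal_solution_normal : Prop := ∀ (A : List Int), Dom_solution_normal A → Spec_solution_normal A (solution_normal A)

-- ===== LEMMAS AND PROOFS =====

theorem pvInnerA_aux (j : Int) (hj : 0 ≤ j) (sign : List Int) (n : Nat) (c : List Int)
    (hc : c.length = sign.length) :
    (((List.range n).foldl (fun (c : List Int) (h : Nat) =>
        if sign.getD h 0 = 1 then
          match PySem.List.pySet? c ((h : Int) + j) 1 with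
          | some c' => c'
          | none => c
        else c) c).length = sign.length ∧
      ∀ m : Nat, (((List.range n).foldl (fun (c : List Int) (h : Nat) =>
        if sign.getD h 0 = 1 then
          match PySem.List.pySet? c ((h : Int) + j) 1 with
          | some c' => c'
          | none => c
        else c) c).getD m 0 = 1 ↔
        (c.getD m 0 = 1 ∨ ∃ h : Nat, h < n ∧ sign.getD h 0 = 1 ∧ m = h + j.toNat ∧ m < sign.length))) := by
  induction n with
  | zero => simp [hc]
  | succ n ih =>
    rw [List.range_succ, List.foldl_append]
    obtain ⟨ihlen, ihgd⟩ := ih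
    set r := (List.range n).foldl (fun (c : List Int) (h : Nat) =>
        if sign.getD h 0 = 1 then
          match PySem.List.pySet? c ((h : Int) + j) 1 with
          | some c' => c'
          | none => c
        else c) c with hr
    simp only [List.foldl_cons, List.foldl_nil]
    by_cases hs : sign.getD n 0 = 1
    · rw [if_pos hs]
      have hcast : (n : Int) + j = ((n + j.toNat : Nat) : Int) := by omega
      by_cases hlt : n + j.toNat < r.length
      · rw [hcast, PySem.List.pySet?_natCast r (n + j.toNat) 1 hlt]
        refine ⟨by simpa using ihlen, fun m => ?_⟩
        have hmlen : (r.set (n + j.toNat) 1).getD m 0 = if n + j.toNat = m then 1 else r.getD m 0 := by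
          simp only [List.getD_eq_getElem?_getD, List.getElem?_set, if_pos hlt]
          split_ifs <;> simp
        rw [hmlen]
        by_cases hm : n + j.toNat = m
        · simp only [if_pos hm]
          constructor
          · intro _; exact Or.inr ⟨n, by omega, hs, by omega, by omega⟩
          · intro _; trivial
        · rw [if_neg hm, ihgd m]
          constructor
          · rintro (h | ⟨h, hh, h1, h2, h3⟩)
            · exact Or.inl h
            · exact Or.inr ⟨h, by omega, h1, h2, h3⟩
          · rintro (h | ⟨h, hh, h1, h2, h3⟩)
            · exact Or.inl h
            · refine Or.inr ⟨h, ?_, h1, h2, h3⟩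
              rcases Nat.lt_succ_iff_lt_or_eq.mp hh with h' | h'
              · exact h'
              · exfalso; exact hm (by omega)
      · have hnone : PySem.List.pySet? r ((n : Int) + j) 1 = none := by
          rw [PySem.List.pySet?_eq_none_iff]
          intro hin
          have h2 : ((n : Int) + j) < r.length := hin.2
          omega
        rw [hnone]
        refine ⟨ihlen, fun m => ?_⟩
        rw [ihgd m]
        constructor
        · rintro (h | ⟨h, hh, h1, h2, h3⟩)
          · exact Or.inl h
          · exact Or.inr ⟨h, by omega, h1, h2, h3⟩
        · rintro (h | ⟨h, hh, h1, h2, h3⟩)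
          · exact Or.inl h
          · refine Or.inr ⟨h, ?_, h1, h2, h3⟩
            rcases Nat.lt_succ_iff_lt_or_eq.mp hh with h' | h'
            · exact h'
            · exfalso; rw [ihlen] at hlt; omega
    · rw [if_neg hs]
      refine ⟨ihlen, fun m => ?_⟩
      rw [ihgd m]
      constructor
      · rintro (h | ⟨h, hh, h1, h2, h3⟩)
        · exact Or.inl h
        · exact Or.inr ⟨h, by omega, h1, h2, h3⟩
      · rintro (h | ⟨h, hh, h1, h2, h3⟩)
        · exact Or.inl h
        · refine Or.inr ⟨h, ?_, h1, h2, h3⟩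
          rcases Nat.lt_succ_iff_lt_or_eq.mp hh with h' | h'
          · exact h'
          · exfalso; rw [h'] at h1; exact hs h1

-- A's step on an element j ≤ half: which entries are 1 afterwards
theorem pvStepA_char (half j : Int) (hj : 0 ≤ j) (hjh : j ≤ half) (sign : List Int)
    (hjL : j.toNat < sign.length) :
    (pvStepA half sign j).length = sign.length ∧
    ∀ m : Nat, ((pvStepA half sign j).getD m 0 = 1 ↔
      (m = j.toNat ∨ sign.getD m 0 = 1 ∨
        ∃ h : Nat, h < sign.length ∧ sign.getD h 0 = 1 ∧ m = h + j.toNat ∧ m < sign.length)) := by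
  have hconv : pvStepA half sign j =
      PySem.List.pySetD ((List.range sign.length).foldl (fun (c : List Int) (h : Nat) =>
        if sign.getD h 0 = 1 then
          match PySem.List.pySet? c ((h : Int) + j) 1 with
          | some c' => c'
          | none => c
        else c) sign) j 1 := by
    have hfold : (PySem.List.pyRange 0 (PySem.List.len sign) 1).foldl (fun (c : List Int) h =>
        if PySem.List.pyGetD sign h 0 = 1 then
          match PySem.List.pySet? c (h + j) 1 with
          | some c' => c'
          | none => c
        else c) sign = (List.range sign.length).foldl (fun (c : List Int) (h : Nat) =>
        if sign.getD h 0 = 1 then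
          match PySem.List.pySet? c ((h : Int) + j) 1 with
          | some c' => c'
          | none => c
        else c) sign := by
      rw [show PySem.List.len sign = ((sign.length : Nat) : Int) from PySem.List.len_eq sign,
          PySem.List.pyRange_zero_nat, List.foldl_map]
      apply PySem.List.foldl_congr_mem
      intro acc x hx
      simp [PySem.List.pyGetD_natCast]
    unfold pvStepA
    rw [if_pos hjh]
    simp only [hfold]
  obtain ⟨hlen, hgd⟩ := pvInnerA_aux j hj sign sign.length sign rfl
  set r := (List.range sign.length).foldl (fun (c : List Int) (h : Nat) =>
        if sign.getD h 0 = 1 then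
          match PySem.List.pySet? c ((h : Int) + j) 1 with
          | some c' => c'
          | none => c
        else c) sign with hr
  rw [hconv, PySem.List.pySetD_of_nonneg _ _ hj]
  constructor
  · simpa using hlen
  · intro m
    have hjr : j.toNat < r.length := by omega
    have : (r.set j.toNat 1).getD m 0 = if j.toNat = m then 1 else r.getD m 0 := by
      simp only [List.getD_eq_getElem?_getD, List.getElem?_set, if_pos hjr]
      split_ifs <;> simp
    rw [this]
    by_cases hm : j.toNat = m
    · simp only [if_pos hm]
      constructor
      · intro _; exact Or.inl hm.symm
      · intro _; trivial
    · rw [if_neg hm, hgd m]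
      constructor
      · rintro (h | h)
        · exact Or.inr (Or.inl h)
        · exact Or.inr (Or.inr h)
      · rintro (h | h | h)
        · exact absurd h.symm hm
        · exact Or.inl h
        · exact Or.inr h

theorem pvStepA_gt (half j : Int) (h : ¬ j ≤ half) (sign : List Int) : pvStepA half sign j = sign := by
  simp [pvStepA, h]

-- A's fold, characterised: entry m is 1 iff m = b + (sum of a sublist), from a base b already marked
-- (or b = 0 with a nonempty sublist)
theorem pvA_char (half : Int) (hhalf : 0 ≤ half) (L : List Int) :
    ∀ (sign : List Int), (∀ v ∈ L, 0 ≤ v) → sign.length = half.toNat + 1 →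
    ∀ m : Nat, m < half.toNat + 1 →
    ((L.foldl (pvStepA half) sign).getD m 0 = 1 ↔
      ∃ P, P.Sublist L ∧ ∃ b : Nat, b < half.toNat + 1 ∧ (m : Int) = (b : Int) + P.sum ∧
        (sign.getD b 0 = 1 ∨ (b = 0 ∧ P ≠ []))) := by
  induction L with
  | nil =>
    intro sign _ hlen m hm
    simp only [List.foldl_nil]
    constructor
    · intro h
      exact ⟨[], List.Sublist.refl _, m, hm, by simp, Or.inl h⟩
    · rintro ⟨P, hP, b, hb, hmb, hbase⟩
      have hPnil : P = [] := List.sublist_nil.mp hP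
      subst hPnil
      have : m = b := by simp at hmb; omega
      subst this
      rcases hbase with h | ⟨_, h⟩
      · exact h
      · exact absurd rfl h
  | cons v L ih =>
    intro sign hv hlen m hm
    have hv0 : 0 ≤ v := hv v List.mem_cons_self
    have hvL : ∀ w ∈ L, 0 ≤ w := fun w hw => hv w (List.mem_cons_of_mem _ hw)
    simp only [List.foldl_cons]
    by_cases hvh : v ≤ half
    · obtain ⟨hlen', hchar⟩ := pvStepA_char half v hv0 hvh sign (by omega)
      have hlen'' : (pvStepA half sign v).length = half.toNat + 1 := by omega
      rw [ih (pvStepA half sign v) hvL hlen'' m hm]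
      constructor
      · rintro ⟨P, hP, b', hb', hmb', hbase'⟩
        rcases hbase' with hmark | ⟨hb0, hPne⟩
        · rcases (hchar b').mp hmark with h1 | h1 | ⟨h, hhl, hsh, hbeq, _⟩
          · -- b' = v.toNat : prepend v, base 0
            refine ⟨v :: P, List.Sublist.cons₂ v hP, 0, by omega, ?_, Or.inr ⟨rfl, by simp⟩⟩
            have : ((b' : Nat) : Int) = v := by omega
            simp only [List.sum_cons]
            omega
          · exact ⟨P, List.Sublist.cons v hP, b', hb', hmb', Or.inl h1⟩
          · -- b' = h + v.toNat : prepend v, base h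
            refine ⟨v :: P, List.Sublist.cons₂ v hP, h, by omega, ?_, Or.inl hsh⟩
            simp only [List.sum_cons]
            omega
        · exact ⟨P, List.Sublist.cons v hP, 0, by omega, by omega, Or.inr ⟨rfl, hPne⟩⟩
      · rintro ⟨P', hP', b, hb, hmb, hbase⟩
        rcases List.sublist_cons_iff.mp hP' with hPL | ⟨P, rfl, hPL⟩
        · -- P' avoids v: lift the base through the step
          refine ⟨P', hPL, b, hb, hmb, ?_⟩
          rcases hbase with h | h
          · exact Or.inl ((hchar b).mpr (Or.inr (Or.inl h)))
          · exact Or.inr h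
        · -- P' = v :: P: absorb v into the base
          have hPsum : 0 ≤ P.sum :=
            List.sum_nonneg (fun x hx => hvL x (hPL.subset hx))
          have hmv : (m : Int) = (b : Int) + v + P.sum := by
            simp only [List.sum_cons] at hmb; omega
          have hb2 : (b : Int) + v ≤ half := by omega
          have hb2' : b + v.toNat < half.toNat + 1 := by omega
          have hmark2 : (pvStepA half sign v).getD (b + v.toNat) 0 = 1 := by
            rcases hbase with h | ⟨hb0, _⟩
            · exact (hchar (b + v.toNat)).mpr (Or.inr (Or.inr ⟨b, by omega, h, rfl, by omega⟩))
            · subst hb0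
              exact (hchar (0 + v.toNat)).mpr (Or.inl (by omega))
          exact ⟨P, hPL, b + v.toNat, hb2', by push_cast; omega, Or.inl hmark2⟩
    · rw [pvStepA_gt half v hvh]
      rw [ih sign hvL hlen m hm]
      constructor
      · rintro ⟨P, hP, b, hb, hmb, hbase⟩
        exact ⟨P, List.Sublist.cons v hP, b, hb, hmb, hbase⟩
      · rintro ⟨P', hP', b, hb, hmb, hbase⟩
        rcases List.sublist_cons_iff.mp hP' with hPL | ⟨P, rfl, hPL⟩
        · exact ⟨P', hPL, b, hb, hmb, hbase⟩
        · exfalso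
          have hPsum : 0 ≤ P.sum :=
            List.sum_nonneg (fun x hx => hvL x (hPL.subset hx))
          simp only [List.sum_cons] at hmb
          omega

-- B's step: y is in the new set iff y = r ± |x| for some r in the old set
theorem pvStepB_mem (s : PySem.Set Int) (x y : Int) :
    y ∈ pvStepB s x ↔ ∃ r ∈ s, (y = r + |x| ∨ y = r - |x|) := by
  unfold pvStepB
  rw [PySem.Set.mem_union]
  simp only [PySem.Set.mem_ofList, List.mem_map]
  rcases abs_choice x with h | h
  · constructor
    · rintro (⟨r, hr, rfl⟩ | ⟨r, hr, rfl⟩)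
      · exact ⟨r, hr, Or.inl (by omega)⟩
      · exact ⟨r, hr, Or.inr (by omega)⟩
    · rintro ⟨r, hr, (rfl | rfl)⟩
      · exact Or.inl ⟨r, hr, by omega⟩
      · exact Or.inr ⟨r, hr, by omega⟩
  · constructor
    · rintro (⟨r, hr, rfl⟩ | ⟨r, hr, rfl⟩)
      · exact ⟨r, hr, Or.inr (by omega)⟩
      · exact ⟨r, hr, Or.inl (by omega)⟩
    · rintro ⟨r, hr, (rfl | rfl)⟩
      · exact Or.inr ⟨r, hr, by omega⟩
      · exact Or.inl ⟨r, hr, by omega⟩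

-- B's fold, characterised: the signed sums are exactly base + total − 2 * (sum of a sublist of |L|)
theorem pvB_char (L : List Int) :
    ∀ (s : PySem.Set Int) (y : Int),
    (y ∈ L.foldl pvStepB s ↔
      ∃ s0 ∈ s, ∃ M : List Int, M.Sublist (L.map (fun x => |x|)) ∧
        y = s0 + (L.map (fun x => |x|)).sum - 2 * M.sum) := by
  induction L with
  | nil =>
    intro s y
    simp only [List.foldl_nil, List.map_nil, List.sum_nil]
    constructor
    · intro h
      exact ⟨y, h, [], List.Sublist.refl _, by simp⟩
    · rintro ⟨s0, hs0, M, hM, rfl⟩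
      have : M = [] := List.sublist_nil.mp hM
      subst this
      simpa using hs0
  | cons x L ih =>
    intro s y
    simp only [List.foldl_cons, List.map_cons, List.sum_cons]
    rw [ih (pvStepB s x) y]
    constructor
    · rintro ⟨s1, hs1, M, hM, rfl⟩
      rcases (pvStepB_mem s x s1).mp hs1 with ⟨r, hr, (rfl | rfl)⟩
      · exact ⟨r, hr, M, List.Sublist.cons _ hM, by ring⟩
      · exact ⟨r, hr, |x| :: M, List.Sublist.cons₂ _ hM, by simp [List.sum_cons]; ring⟩
    · rintro ⟨s0, hs0, M', hM', rfl⟩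
      rcases List.sublist_cons_iff.mp hM' with hML | ⟨M, rfl, hML⟩
      · refine ⟨s0 + |x|, (pvStepB_mem s x _).mpr ⟨s0, hs0, Or.inl rfl⟩, M', hML, by ring⟩
      · refine ⟨s0 - |x|, (pvStepB_mem s x _).mpr ⟨s0, hs0, Or.inr rfl⟩, M, hML, ?_⟩
        simp only [List.sum_cons]; ring

-- every sublist of a list has a complementary sublist with the complementary sum
theorem pvComplement (L : List Int) (M : List Int) (h : M.Sublist L) :
    ∃ M' : List Int, M'.Sublist L ∧ M.sum + M'.sum = L.sum := by
  induction h with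
  | slnil => exact ⟨[], List.Sublist.refl _, by simp⟩
  | @cons l₁ l₂ a _ ih =>
    obtain ⟨M', hM', hsum⟩ := ih
    exact ⟨a :: M', List.Sublist.cons₂ a hM', by simp [List.sum_cons]; omega⟩
  | @cons₂ l₁ l₂ a _ ih =>
    obtain ⟨M', hM', hsum⟩ := ih
    exact ⟨M', List.Sublist.cons a hM', by simp [List.sum_cons]; omega⟩

-- find? on a descending range returns the maximal satisfying index
theorem pvFindDesc (p : Int → Bool) (a : Nat) (m : Int) (h0 : 0 ≤ m) (hma : m ≤ (a : Int))
    (hm : p m = true) (hmax : ∀ k : Int, m < k → k ≤ (a : Int) → p k = false) :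
    List.find? p (PySem.List.pyRange (a : Int) (-1) (-1)) = some m := by
  induction a with
  | zero =>
    have hm0 : m = 0 := by omega
    rw [PySem.List.pyRange_neg_one_cons (by norm_num), PySem.List.pyRange_neg_one_eq_nil (by norm_num)]
    subst hm0
    simp [List.find?, hm]
  | succ a ih =>
    rw [PySem.List.pyRange_neg_one_cons (by push_cast; omega)]
    by_cases hme : m = ((a : Int) + 1)
    · rw [List.find?_cons, show p ((a:Nat).succ : Int) = true by push_cast; rw [← hme]; exact hm]
      rw [hme]; push_cast; ring_nf
    · have hlt : m ≤ (a : Int) := by push_cast at hma ⊢; omega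
      have hpf : p ((a:Nat).succ : Int) = false := by
        have he : (((a:Nat).succ : Nat) : Int) = (a : Int) + 1 := by push_cast; ring
        rw [he]
        exact hmax ((a : Int) + 1) (by omega) (by push_cast; omega)
      rw [List.find?_cons, hpf]
      have harg : ((a:Nat).succ : Int) - 1 = (a : Int) := by push_cast; ring
      rw [harg]
      exact ih hlt (fun k hk1 hk2 => hmax k hk1 (by push_cast; omega))

-- min(|s| for s in S): characterised by a member attaining t and t being a lower bound
theorem pvMinAbsEq (S : List Int) (t : Int) (hex : ∃ y ∈ S, |y| = t) (hlb : ∀ y ∈ S, t ≤ |y|) :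
    PySem.List.min? (S.map (fun s => |s|)) (fun y => y) = some t := by
  obtain ⟨y0, hy0, hy0t⟩ := hex
  cases hmin : PySem.List.min? (S.map (fun s => |s|)) (fun y => y) with
  | none =>
    have := (PySem.List.min?_eq_none_iff _ _).mp hmin
    rw [List.map_eq_nil_iff] at this
    subst this
    exact absurd hy0 (List.not_mem_nil)
  | some m =>
    obtain ⟨y, hy, rfl⟩ := List.mem_map.mp (PySem.List.min?_mem hmin)
    have hle : |y| ≤ |y0| := PySem.List.min?_isMin hmin (|y0|) (List.mem_map_of_mem hy0)
    have hge : t ≤ |y| := hlb y hy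
    have : |y| = t := by omega
    rw [this]

-- ===== VERDICT (by name: the statement is the Claim_ definition above) =====
theorem solution_normal_spec : Claim_equal_solution_normal := by
  intro A _
  unfold Spec_solution_normal
  by_cases h0 : A.length = 0
  · have : A = [] := List.length_eq_zero_iff.mp h0
    subst this; decide
  -- common B-side setup
  set vals := A.map (fun x => |x|) with hvals
  set T := vals.sum with hT
  have hv0 : ∀ v ∈ vals, 0 ≤ v := by
    intro v hv
    rw [hvals, List.mem_map] at hv
    obtain ⟨x, _, hx⟩ := hv
    rw [← hx]; exact abs_nonneg x
  have hTnn : 0 ≤ T := List.sum_nonneg hv0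
  have hBchar : ∀ y, y ∈ A.foldl pvStepB (PySem.Set.ofList [0]) ↔
      ∃ M : List Int, M.Sublist vals ∧ y = T - 2 * M.sum := by
    intro y
    rw [pvB_char A (PySem.Set.ofList [0]) y]
    constructor
    · rintro ⟨s0, hs0, M, hM, rfl⟩
      rw [PySem.Set.mem_ofList, List.mem_singleton] at hs0
      subst hs0
      refine ⟨M, by rw [hvals]; exact hM, ?_⟩
      rw [hT, hvals]; ring
    · rintro ⟨M, hM, rfl⟩
      refine ⟨0, by rw [PySem.Set.mem_ofList]; exact List.mem_singleton_self 0,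
             M, by rw [hvals] at hM; exact hM, ?_⟩
      rw [hT, hvals]; ring
  by_cases h1 : A.length = 1
  · -- len(A) == 1: A returns |A[0]|, B's set is {a, -a}
    obtain ⟨a, rfl⟩ := List.length_eq_one_iff.mp h1
    have habsT : T = |a| := by rw [hT, hvals]; simp
    have hex : ∃ y ∈ [a].foldl pvStepB (PySem.Set.ofList [0]), |y| = |a| := by
      refine ⟨T, (hBchar T).mpr ⟨[], List.nil_sublist _, by simp⟩, ?_⟩
      rw [habsT, abs_abs]
    have hlb : ∀ y ∈ [a].foldl pvStepB (PySem.Set.ofList [0]), |a| ≤ |y| := by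
      intro y hy
      obtain ⟨M, hM, rfl⟩ := (hBchar y).mp hy
      have : M = [] ∨ M = [|a|] := by
        rw [hvals] at hM
        simp only [List.map_cons, List.map_nil] at hM
        rcases List.sublist_cons_iff.mp hM with h | ⟨r, hr, hrr⟩
        · exact Or.inl (List.sublist_nil.mp h)
        · have : r = [] := List.sublist_nil.mp hrr
          subst this; exact Or.inr hr
      rcases this with rfl | rfl
      · rw [habsT]; simp
      · rw [habsT, show (|a| : Int) - 2 * List.sum [|a|] = -|a| by simp; omega,
            abs_neg, abs_abs]
    have hmineq := pvMinAbsEq ([a].foldl pvStepB (PySem.Set.ofList [0])) (|a|) hex hlb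
    simp only [solution_normal, List.length_cons, List.length_nil, solution_normal_alt]
    rw [hmineq]
    simp [PySem.List.pyGetD_zero_cons]
  -- len(A) ≥ 2: the DP case
  simp only [solution_normal, if_neg h0, if_neg h1]
  set half := PySem.Int.floordiv T 2 with hhalfdef
  have hediv : half = T / 2 := PySem.Int.floordiv_eq_ediv_of_pos (by norm_num)
  have hpar : 2 * half ≤ T ∧ T ≤ 2 * half + 1 := by rw [hediv]; omega
  have hhalf : 0 ≤ half := by omega
  set sign0 : List Int := List.replicate (half + 1).toNat 0 with hsign0
  have hLen : sign0.length = half.toNat + 1 := by rw [hsign0, List.length_replicate]; omega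
  have hgd0 : ∀ m : Nat, sign0.getD m 0 = 0 := by
    intro m
    rw [hsign0]
    simp only [List.getD_eq_getElem?_getD, List.getElem?_replicate]
    split_ifs <;> simp
  set signF := vals.foldl (pvStepA half) sign0 with hsignF
  have hmark : ∀ m : Nat, m < half.toNat + 1 →
      (signF.getD m 0 = 1 ↔ ∃ P : List Int, P.Sublist vals ∧ P ≠ [] ∧ (m : Int) = P.sum) := by
    intro m hm
    rw [hsignF, pvA_char half hhalf vals sign0 hv0 hLen m hm]
    constructor
    · rintro ⟨P, hP, b, hb, hmb, hbase⟩
      rcases hbase with h | ⟨rfl, hne⟩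
      · rw [hgd0 b] at h; exact absurd h (by norm_num)
      · exact ⟨P, hP, hne, by simpa using hmb⟩
    · rintro ⟨P, hP, hne, hmP⟩
      exact ⟨P, hP, 0, by omega, by simpa using hmP, Or.inr ⟨rfl, hne⟩⟩
  -- some element v of vals satisfies 0 ≤ v ≤ half
  obtain ⟨a, b, tl, hA⟩ : ∃ a b tl, A = a :: b :: tl := by
    rcases A with _ | ⟨a, _ | ⟨b, tl⟩⟩
    · exact absurd rfl h0
    · exact absurd rfl h1
    · exact ⟨a, b, tl, rfl⟩
  have hvalsc : vals = |a| :: |b| :: tl.map (fun x => |x|) := by rw [hvals, hA]; simp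
  obtain ⟨v, hvmem, hv2, hvnn⟩ : ∃ v, v ∈ vals ∧ 2 * v ≤ T ∧ 0 ≤ v := by
    have hsum : T = |a| + (|b| + (tl.map (fun x => |x|)).sum) := by
      rw [hT, hvalsc]; simp
    have hts : 0 ≤ (tl.map (fun x => |x|)).sum :=
      List.sum_nonneg (by
        intro x hx
        rw [List.mem_map] at hx
        obtain ⟨y, _, hy⟩ := hx
        rw [← hy]; exact abs_nonneg y)
    rcases le_total |a| |b| with hab | hab
    · exact ⟨|a|, by rw [hvalsc]; exact List.mem_cons_self, by omega, abs_nonneg a⟩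
    · exact ⟨|b|, by rw [hvalsc]; exact List.mem_cons_of_mem _ List.mem_cons_self, by omega, abs_nonneg b⟩
  have hvhalf : v ≤ half := by omega
  have hmarkv : signF.getD v.toNat 0 = 1 :=
    (hmark v.toNat (by omega)).mpr
      ⟨[v], List.singleton_sublist.mpr hvmem, by simp, by simp; omega⟩
  -- K: the greatest marked index
  set K := Nat.findGreatest (fun m => signF.getD m 0 = 1) half.toNat with hK
  have hKmark : signF.getD K 0 = 1 := Nat.findGreatest_spec (P := fun m => signF.getD m 0 = 1) (m := v.toNat) (n := half.toNat) (by omega) hmarkv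
  have hKle : K ≤ half.toNat := Nat.findGreatest_le half.toNat
  -- A returns T - 2 * K
  have hfind : List.find? (fun k => PySem.List.pyGetD signF k 0 == 1)
      (PySem.List.pyRange half (-1) (-1)) = some ((K : Nat) : Int) := by
    have hp : (fun k => PySem.List.pyGetD signF k 0 == 1) ((K : Nat) : Int) = true := by
      simp only [PySem.List.pyGetD_natCast, hKmark]
      exact beq_self_eq_true 1
    have hmax : ∀ k : Int, ((K : Nat) : Int) < k → k ≤ ((half.toNat : Nat) : Int) →
        (fun k => PySem.List.pyGetD signF k 0 == 1) k = false := by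
      intro k hk1 hk2
      by_contra hne
      have hkt : PySem.List.pyGetD signF k 0 = 1 := by
        have := Bool.of_not_eq_false hne
        simpa using this
      have hk0 : 0 ≤ k := by omega
      have hkn : ((k.toNat : Nat) : Int) = k := Int.toNat_of_nonneg hk0
      rw [← hkn, PySem.List.pyGetD_natCast] at hkt
      exact Nat.findGreatest_is_greatest (P := fun m => signF.getD m 0 = 1) (n := half.toNat)
        (k := k.toNat) (by omega) (by omega) hkt
    have := pvFindDesc (fun k => PySem.List.pyGetD signF k 0 == 1) half.toNat
      ((K : Nat) : Int) (by omega) (by omega) hp hmax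
    rwa [Int.toNat_of_nonneg hhalf] at this
  rw [hfind]
  -- B returns the same value
  have hKnn : (0 : Int) ≤ T - 2 * (K : Int) := by omega
  have hex : ∃ y ∈ A.foldl pvStepB (PySem.Set.ofList [0]), |y| = T - 2 * (K : Int) := by
    obtain ⟨P, hP, _, hPK⟩ := (hmark K (by omega)).mp hKmark
    have hy : T - 2 * (K : Int) = T - 2 * P.sum := by omega
    exact ⟨T - 2 * (K : Int), (hBchar (T - 2 * (K : Int))).mpr ⟨P, hP, hy⟩, abs_of_nonneg hKnn⟩
  have hlb : ∀ y ∈ A.foldl pvStepB (PySem.Set.ofList [0]), T - 2 * (K : Int) ≤ |y| := by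
    intro y hy
    obtain ⟨M, hM, rfl⟩ := (hBchar y).mp hy
    have hq0 : 0 ≤ M.sum := List.sum_nonneg (fun x hx => hv0 x (hM.subset hx))
    have hqT : M.sum ≤ T := List.Sublist.sum_le_sum hM hv0
    by_cases hq : M.sum ≤ half
    · rw [abs_of_nonneg (by omega)]
      by_cases hMnil : M = []
      · subst hMnil; simp
      · have hmk : signF.getD M.sum.toNat 0 = 1 :=
          (hmark M.sum.toNat (by omega)).mpr ⟨M, hM, hMnil, by omega⟩
        have : M.sum.toNat ≤ K := Nat.le_findGreatest (by omega) hmk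
        omega
    · obtain ⟨M', hM', hsum⟩ := pvComplement vals M hM
      have hq'0 : 0 ≤ M'.sum := List.sum_nonneg (fun x hx => hv0 x (hM'.subset hx))
      have hq' : M'.sum ≤ half := by omega
      rw [abs_of_nonpos (by omega)]
      by_cases hM'nil : M' = []
      · subst hM'nil; simp at hsum; omega
      · have hmk : signF.getD M'.sum.toNat 0 = 1 :=
          (hmark M'.sum.toNat (by omega)).mpr ⟨M', hM', hM'nil, by omega⟩
        have : M'.sum.toNat ≤ K := Nat.le_findGreatest (by omega) hmk
        omega
  have hmineq := pvMinAbsEq (A.foldl pvStepB (PySem.Set.ofList [0])) (T - 2 * (K : Int)) hex hlb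
  simp only [solution_normal_alt]
  rw [hmineq]
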